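-- pv_equiv track=rewrite | github.com/kgorlov/A-summary-of-messages-from-Telegram | tg_self_analyze.py | stream_next_object
-- ===== SOURCE A (Python) =====
-- from typing import List, Dict, Any, Optional, Tuple
--
-- def stream_next_object(s: str, idx: int) -> Tuple[Optional[str], int]:
--     n = len(s)
--     # пропускаем пробелы, запятые и всякий юникод-мусор, включая BOM и узкие пробелы
--     SKIP = " \r\n\t,\ufeff\u00A0\u2009\u202F"
--     while idx < n and s[idx] in SKIP:
--         idx += 1
--     if idx >= n or s[idx] != "{":
--         return None, idx
--     start = idx
--     depth = 0
--     in_str = False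
--     esc = False
--     while idx < n:
--         ch = s[idx]
--         if in_str:
--             if esc:
--                 esc = False
--             elif ch == "\\":
--                 esc = True
--             elif ch == '"':
--                 in_str = False
--         else:
--             if ch == '"':
--                 in_str = True
--             elif ch == "{":
--                 depth += 1
--             elif ch == "}":
--                 depth -= 1
--                 if depth == 0:
--                     idx += 1
--                     return s[start:idx], idx
--         idx += 1
--     return None, idx
-- ===== SOURCE B (Python) =====
-- def stream_next_object(s, idx):
--     n = len(s)
--     SKIP = " \r\n\t,\ufeff\u00A0\u2009\u202F"
--     while idx < n and s[idx] in SKIP: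
--         idx += 1
--     if idx >= n or s[idx] != "{":
--         return None, idx
--     start = idx
--     # pass 1: tokenize -- positions of structural braces outside string literals
--     toks = []
--     i = start
--     while i < n:
--         c = s[i]
--         if c == '"':
--             i += 1
--             while i < n:
--                 d = s[i]
--                 if d == "\\":
--                     i = min(i + 2, n)
--                 elif d == '"':
--                     i += 1
--                     break
--                 else:
--                     i += 1
--         elif c == "{" or c == "}":
--             toks.append((i, c))
--             i += 1
--         else:
--             i += 1
--     # pass 2: match -- fold depth over the token list
--     depth = 0
--     for p, c in toks:
--         if c == "{":
--             depth += 1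
--         else:
--             depth -= 1
--             if depth == 0:
--                 return s[start:p + 1], p + 1
--     return None, n
-- ===== Notes on version B (the rewrite author's own statement) =====
-- stated objective: alternative
-- what changed: A's fused single-pass state machine with in_str/esc/depth flags is replaced by two staged passes: a tokenizer that materializes the list of structural braces outside string literals, then a separate fold over that token list tracking depth to find the matching '}'.
import Mathlib
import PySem

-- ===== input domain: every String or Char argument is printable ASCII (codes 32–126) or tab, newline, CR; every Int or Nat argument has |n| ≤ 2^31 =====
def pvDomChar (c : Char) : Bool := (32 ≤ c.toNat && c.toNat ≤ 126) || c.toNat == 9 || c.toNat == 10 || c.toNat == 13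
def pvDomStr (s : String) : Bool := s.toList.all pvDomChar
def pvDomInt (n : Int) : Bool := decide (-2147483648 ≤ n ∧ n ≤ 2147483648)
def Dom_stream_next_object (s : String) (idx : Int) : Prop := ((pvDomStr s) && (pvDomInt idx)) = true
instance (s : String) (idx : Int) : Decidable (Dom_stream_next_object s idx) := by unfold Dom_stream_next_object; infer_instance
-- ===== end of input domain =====

-- B replaces A's fused single-pass flag-driven (in_str/esc/depth) state machine by two staged
-- passes: first tokenize the structural braces outside string literals into a list, then fold
-- brace depth over that token list (alternative decomposition, same asymptotic cost).
-- All loops are ported with an explicit fuel argument (chosen ≥ the remaining characters) as a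
-- totality guard; the fuel is never exhausted on the iterations the Python performs.

-- ===== PORT A =====
def pvSkipCharsA : List Char := [' ', '\r', '\n', '\t', ',', Char.ofNat 0xFEFF, Char.ofNat 0x00A0, Char.ofNat 0x2009, Char.ofNat 0x202F]

def pvSkipA (cs : List Char) (n : Int) : Nat → Int → Int
  | 0, idx => idx
  | fuel + 1, idx =>
    if idx < n then
      match PySem.List.pyGet? cs idx with
      | some c => if pvSkipCharsA.contains c then pvSkipA cs n fuel (idx + 1) else idx
      | none => idx  -- Python raises here (IndexError); outside Pre_
    else idx

def pvLoopA (cs : List Char) (n start : Int) : Nat → Int → Int → Bool → Bool → Option String × Int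
  | 0, idx, _, _, _ => (none, idx)  -- fuel never runs out on the iterations Python performs
  | fuel + 1, idx, depth, instr, esc =>
    if idx < n then
      match PySem.List.pyGet? cs idx with
      | none => (none, idx)  -- Python raises here (IndexError); outside Pre_
      | some ch =>
        if instr then
          if esc then pvLoopA cs n start fuel (idx + 1) depth true false
          else if ch = '\\' then pvLoopA cs n start fuel (idx + 1) depth true true
          else if ch = '"' then pvLoopA cs n start fuel (idx + 1) depth false false
          else pvLoopA cs n start fuel (idx + 1) depth true false
        else
          if ch = '"' then pvLoopA cs n start fuel (idx + 1) depth true false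
          else if ch = '{' then pvLoopA cs n start fuel (idx + 1) (depth + 1) false false
          else if ch = '}' then
            if depth - 1 = 0 then
              (some (String.ofList (PySem.List.slice cs (some start) (some (idx + 1)))), idx + 1)
            else pvLoopA cs n start fuel (idx + 1) (depth - 1) false false
          else pvLoopA cs n start fuel (idx + 1) depth false false
    else (none, idx)

def stream_next_object (s : String) (idx : Int) : Option String × Int :=
  let cs := s.toList
  let n : Int := cs.length
  let i := pvSkipA cs n ((n - idx).toNat + 1) idx
  if i ≥ n then (none, i)
  else
    match PySem.List.pyGet? cs i with
    | none => (none, i)  -- Python raises here (IndexError); outside Pre_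
    | some c => if c ≠ '{' then (none, i) else pvLoopA cs n i ((n - i).toNat + 1) i 0 false false

-- ===== PORT B =====
def pvSkipCharsB : List Char := [' ', '\r', '\n', '\t', ',', Char.ofNat 0xFEFF, Char.ofNat 0x00A0, Char.ofNat 0x2009, Char.ofNat 0x202F]

def pvSkipB (cs : List Char) (n : Int) : Nat → Int → Int
  | 0, idx => idx
  | fuel + 1, idx =>
    if idx < n then
      match PySem.List.pyGet? cs idx with
      | some c => if pvSkipCharsB.contains c then pvSkipB cs n fuel (idx + 1) else idx
      | none => idx  -- Python raises here (IndexError); outside Pre_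
    else idx

-- string-literal body sub-scanner of pass 1: index just past the literal
def pvStrB (cs : List Char) (n : Int) : Nat → Int → Int
  | 0, idx => idx  -- fuel never runs out on the iterations Python performs
  | fuel + 1, idx =>
    if idx < n then
      match PySem.List.pyGet? cs idx with
      | none => idx  -- Python raises here (IndexError); outside Pre_
      | some c =>
        if c = '\\' then pvStrB cs n fuel (min (idx + 2) n)
        else if c = '"' then idx + 1
        else pvStrB cs n fuel (idx + 1)
    else idx

-- pass 1: tokenize the structural braces outside string literals
def pvTokB (cs : List Char) (n : Int) : Nat → Int → List (Int × Char)
  | 0, _ => []  -- fuel never runs out on the iterations Python performs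
  | fuel + 1, idx =>
    if idx < n then
      match PySem.List.pyGet? cs idx with
      | none => []  -- Python raises here (IndexError); outside Pre_
      | some c =>
        if c = '"' then pvTokB cs n fuel (pvStrB cs n ((n - (idx + 1)).toNat + 1) (idx + 1))
        else if c = '{' ∨ c = '}' then (idx, c) :: pvTokB cs n fuel (idx + 1)
        else pvTokB cs n fuel (idx + 1)
    else []

-- pass 2: fold brace depth over the token list
def pvMatchB (cs : List Char) (n start : Int) (toks : List (Int × Char)) (depth : Int) :
    Option String × Int :=
  match toks with
  | [] => (none, n)
  | (p, c) :: rest =>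
    if c = '{' then pvMatchB cs n start rest (depth + 1)
    else
      if depth - 1 = 0 then
        (some (String.ofList (PySem.List.slice cs (some start) (some (p + 1)))), p + 1)
      else pvMatchB cs n start rest (depth - 1)

def stream_next_object_alt (s : String) (idx : Int) : Option String × Int :=
  let cs := s.toList
  let n : Int := cs.length
  let i := pvSkipB cs n ((n - idx).toNat + 1) idx
  if i ≥ n then (none, i)
  else
    match PySem.List.pyGet? cs i with
    | none => (none, i)  -- Python raises here (IndexError); outside Pre_
    | some c => if c ≠ '{' then (none, i) else pvMatchB cs n i (pvTokB cs n ((n - i).toNat + 1) i) 0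

-- ===== PRECONDITION & SPEC =====
-- Pre_ excludes exactly idx < -len(s), where Python's s[idx] raises IndexError in the skip loop.
def Pre_stream_next_object (s : String) (idx : Int) : Prop := -(PySem.Str.len s) ≤ idx
instance (s : String) (idx : Int) : Decidable (Pre_stream_next_object s idx) := by unfold Pre_stream_next_object; infer_instance
def pvWitness_stream_next_object : String × Int := ("{\"a\": 1}", 0)

def Spec_stream_next_object (s : String) (idx : Int) (out : Option String × Int) : Prop := out = stream_next_object_alt s idx
instance (s : String) (idx : Int) (out : Option String × Int) : Decidable (Spec_stream_next_object s idx out) := by unfold Spec_stream_next_object; infer_instance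

-- ===== CLAIM (what is proved, stated in full; the proofs are below) =====
def Claim_equal_stream_next_object : Prop := ∀ (s : String) (idx : Int), Dom_stream_next_object s idx → Pre_stream_next_object s idx → Spec_stream_next_object s idx (stream_next_object s idx)

-- ===== LEMMAS AND PROOFS =====
lemma pvSkip_eq (cs : List Char) (n : Int) (f : Nat) (idx : Int) :
    pvSkipA cs n f idx = pvSkipB cs n f idx := by
  induction f generalizing idx with
  | zero => rfl
  | succ f ih =>
    simp only [pvSkipA, pvSkipB, pvSkipCharsA, pvSkipCharsB]
    split
    · split
      · split
        · exact ih (idx + 1)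
        · rfl
      · rfl
    · rfl

lemma pvSkipA_ge (cs : List Char) (n : Int) (f : Nat) (idx : Int) : idx ≤ pvSkipA cs n f idx := by
  induction f generalizing idx with
  | zero => simp [pvSkipA]
  | succ f ih =>
    simp only [pvSkipA]
    split
    · split
      · split
        · have := ih (idx + 1); omega
        · omega
      · omega
    · omega

lemma pvGet_some (cs : List Char) (idx : Int) (hge : -(cs.length : Int) ≤ idx)
    (hlt : idx < (cs.length : Int)) : ∃ c, PySem.List.pyGet? cs idx = some c := by
  cases h : PySem.List.pyGet? cs idx with
  | some c => exact ⟨c, rfl⟩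
  | none =>
    rw [PySem.List.pyGet?_eq_none_iff] at h
    exact absurd ⟨hge, hlt⟩ h

lemma pvStrB_ge (cs : List Char) (n : Int) (f : Nat) (idx : Int) : idx ≤ pvStrB cs n f idx := by
  induction f generalizing idx with
  | zero => simp [pvStrB]
  | succ f ih =>
    simp only [pvStrB]
    split
    · split
      · omega
      · split
        · have := ih (min (idx + 2) n); omega
        · split
          · omega
          · have := ih (idx + 1); omega
    · omega

lemma pvStrB_le (cs : List Char) (n : Int) (f : Nat) (idx : Int) (h : idx ≤ n) :
    pvStrB cs n f idx ≤ n := by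
  induction f generalizing idx with
  | zero => simpa [pvStrB]
  | succ f ih =>
    simp only [pvStrB]
    split
    · split
      · omega
      · split
        · exact ih (min (idx + 2) n) (by omega)
        · split
          · omega
          · exact ih (idx + 1) (by omega)
    · omega

-- the result of A's loop does not depend on the fuel, as long as the fuel is adequate
lemma pvLoopA_fuel (cs : List Char) {n : Int} (hn : n = (cs.length : Int)) (start : Int)
    (f g : Nat) (idx depth : Int) (instr esc : Bool)
    (hge : -n ≤ idx) (hle : idx ≤ n) (hf : (n - idx).toNat < f) (hg : (n - idx).toNat < g) :
    pvLoopA cs n start f idx depth instr esc = pvLoopA cs n start g idx depth instr esc := by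
  obtain ⟨f, rfl⟩ : ∃ k, f = k + 1 := ⟨f - 1, by omega⟩
  obtain ⟨g, rfl⟩ : ∃ k, g = k + 1 := ⟨g - 1, by omega⟩
  · by_cases h : idx < n
    · obtain ⟨c, hc⟩ := pvGet_some cs idx (by omega) (by omega)
      simp only [pvLoopA, if_pos h, hc]
      have rec1 : ∀ d i e, pvLoopA cs n start f (idx + 1) d i e = pvLoopA cs n start g (idx + 1) d i e :=
        fun d i e => pvLoopA_fuel cs hn start f g (idx + 1) d i e (by omega) (by omega) (by omega) (by omega)
      split_ifs <;> first | rfl | apply rec1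
    · simp only [pvLoopA, if_neg h]
termination_by (n - idx).toNat
decreasing_by all_goals omega

-- A's in-string phase (in_str = true, esc = false) equals A's outer phase resumed at the
-- index B's string sub-scanner returns.
lemma pvPhase (cs : List Char) {n : Int} (hn : n = (cs.length : Int)) (start : Int)
    (fa fs fc : Nat) (idx depth : Int)
    (hge : -n ≤ idx) (hle : idx ≤ n)
    (ha : (n - idx).toNat < fa) (hs : (n - idx).toNat < fs)
    (hc : (n - pvStrB cs n fs idx).toNat < fc) :
    pvLoopA cs n start fa idx depth true false =
      pvLoopA cs n start fc (pvStrB cs n fs idx) depth false false := by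
  obtain ⟨fa, rfl⟩ : ∃ k, fa = k + 1 := ⟨fa - 1, by omega⟩
  obtain ⟨fs, rfl⟩ : ∃ k, fs = k + 1 := ⟨fs - 1, by omega⟩
  · by_cases h : idx < n
    · obtain ⟨c, hc0⟩ := pvGet_some cs idx (by omega) (by omega)
      rw [pvLoopA, if_pos h, hc0]
      conv_rhs => rw [pvStrB, if_pos h, hc0]
      simp only [pvStrB, if_pos h, hc0] at hc
      simp only [if_true, Bool.false_eq_true, if_false]
      by_cases hb : c = '\\'
      · rw [if_pos hb]
        rw [if_pos hb] at hc ⊢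
        by_cases h1 : idx + 1 < n
        · have hmin : min (idx + 2) n = idx + 2 := by omega
          obtain ⟨c1, hc1⟩ := pvGet_some cs (idx + 1) (by omega) (by omega)
          obtain ⟨fa, rfl⟩ : ∃ k, fa = k + 1 := ⟨fa - 1, by omega⟩
          · rw [pvLoopA, if_pos h1, hc1]
            simp only [if_true]
            rw [show idx + 1 + 1 = idx + 2 from by omega]
            rw [hmin] at hc ⊢
            exact pvPhase cs hn start fa fs fc (idx + 2) depth (by omega) (by omega)
              (by omega) (by omega) hc
        · have hmin : min (idx + 2) n = n := by omega
          rw [hmin] at hc ⊢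
          have hend : pvStrB cs n fs n = n := by
            cases fs with
            | zero => rfl
            | succ fs => simp [pvStrB]
          rw [hend] at hc ⊢
          obtain ⟨fa, rfl⟩ : ∃ k, fa = k + 1 := ⟨fa - 1, by omega⟩
          obtain ⟨fc, rfl⟩ : ∃ k, fc = k + 1 := ⟨fc - 1, by omega⟩
          · rw [pvLoopA, if_neg h1]
            have h2 : idx + 1 = n := by omega
            rw [h2, pvLoopA, if_neg (by omega : ¬ n < n)]
      · rw [if_neg hb]
        rw [if_neg hb] at hc ⊢
        by_cases hq : c = '"'
        · rw [if_pos hq]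
          rw [if_pos hq] at hc ⊢
          exact pvLoopA_fuel cs hn start fa fc (idx + 1) depth false false
            (by omega) (by omega) (by omega) (by omega)
        · rw [if_neg hq]
          rw [if_neg hq] at hc ⊢
          exact pvPhase cs hn start fa fs fc (idx + 1) depth (by omega) (by omega)
            (by omega) (by omega) hc
    · have hend : pvStrB cs n (fs + 1) idx = idx := by rw [pvStrB, if_neg h]
      rw [hend] at hc
      obtain ⟨fc, rfl⟩ : ∃ k, fc = k + 1 := ⟨fc - 1, by omega⟩
      rw [pvLoopA, if_neg h, hend, pvLoopA, if_neg h]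
termination_by (n - idx).toNat
decreasing_by all_goals omega

-- A's fused loop equals B's staged tokenize-then-match on the same suffix
lemma pvMain (cs : List Char) {n : Int} (hn : n = (cs.length : Int)) (start : Int)
    (fa fb : Nat) (idx depth : Int)
    (hge : -n ≤ idx) (hle : idx ≤ n)
    (ha : (n - idx).toNat < fa) (hb : (n - idx).toNat < fb) :
    pvLoopA cs n start fa idx depth false false =
      pvMatchB cs n start (pvTokB cs n fb idx) depth := by
  obtain ⟨fa, rfl⟩ : ∃ k, fa = k + 1 := ⟨fa - 1, by omega⟩
  obtain ⟨fb, rfl⟩ : ∃ k, fb = k + 1 := ⟨fb - 1, by omega⟩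
  · by_cases h : idx < n
    · obtain ⟨c, hc⟩ := pvGet_some cs idx (by omega) (by omega)
      rw [pvLoopA, pvTokB, if_pos h, if_pos h, hc]
      simp only [Bool.false_eq_true, if_false]
      by_cases hq : c = '"'
      · rw [if_pos hq, if_pos hq]
        set j := pvStrB cs n ((n - (idx + 1)).toNat + 1) (idx + 1) with hj
        have h1 := pvStrB_ge cs n ((n - (idx + 1)).toNat + 1) (idx + 1)
        have h2 := pvStrB_le cs n ((n - (idx + 1)).toNat + 1) (idx + 1) (by omega)
        rw [pvPhase cs hn start fa ((n - (idx + 1)).toNat + 1) ((n - j).toNat + 1) (idx + 1)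
          depth (by omega) (by omega) (by omega) (by omega) (by omega)]
        exact pvMain cs hn start ((n - j).toNat + 1) fb j depth (by omega) (by omega)
          (by omega) (by omega)
      · rw [if_neg hq, if_neg hq]
        by_cases ho : c = '{'
        · rw [if_pos ho, if_pos (Or.inl ho), pvMatchB, if_pos ho]
          exact pvMain cs hn start fa fb (idx + 1) (depth + 1) (by omega) (by omega)
            (by omega) (by omega)
        · rw [if_neg ho]
          by_cases hcl : c = '}'
          · rw [if_pos hcl, if_pos (Or.inr hcl), pvMatchB, if_neg ho]
            by_cases hd : depth - 1 = 0
            · rw [if_pos hd, if_pos hd]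
            · rw [if_neg hd, if_neg hd]
              exact pvMain cs hn start fa fb (idx + 1) (depth - 1) (by omega) (by omega)
                (by omega) (by omega)
          · rw [if_neg hcl, if_neg (by tauto : ¬ (c = '{' ∨ c = '}'))]
            exact pvMain cs hn start fa fb (idx + 1) depth (by omega) (by omega)
              (by omega) (by omega)
    · rw [pvLoopA, pvTokB, if_neg h, if_neg h, pvMatchB]
      have : idx = n := by omega
      rw [this]
termination_by (n - idx).toNat
decreasing_by all_goals omega

-- ===== VERDICT (by name: the statement is the Claim_ definition above) =====
theorem stream_next_object_spec : Claim_equal_stream_next_object := by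
  intro s idx _hdom hpre
  unfold Spec_stream_next_object stream_next_object stream_next_object_alt
  simp only
  rw [← pvSkip_eq]
  have hpre' : -(s.toList.length : Int) ≤ idx := by
    have := PySem.Str.len_eq s
    unfold Pre_stream_next_object at hpre
    omega
  have hskip := pvSkipA_ge s.toList (s.toList.length : Int) (((s.toList.length : Int) - idx).toNat + 1) idx
  by_cases hge : pvSkipA s.toList (s.toList.length : Int) (((s.toList.length : Int) - idx).toNat + 1) idx ≥ (s.toList.length : Int)
  · rw [if_pos hge, if_pos hge]
  · rw [if_neg hge, if_neg hge]
    cases hc : PySem.List.pyGet? s.toList (pvSkipA s.toList ((s.toList.length : Nat) : Int) (((s.toList.length : Int) - idx).toNat + 1) idx) with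
    | none => rfl
    | some c =>
      by_cases hb : c ≠ '{'
      · simp only [if_pos hb]
      · simp only [if_neg hb]
        exact pvMain s.toList rfl _ _ _ _ 0 (by omega) (by omega) (by omega) (by omega)
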